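-- pv_equiv track=rewrite | github.com/razin99/google_foo | prisoner/solution.py | solution
-- ===== SOURCE A (Python) =====
-- def solution(x, y):
--     #base case
--     if (x,y) == (1,1):
--         return str(1)
--
--     # | 7
--     # | 4 8
--     # | 2 5 9
--     # | 1 3 6 10
--     # +----------
--
--     # y start row
--     #   Get start value (column 1)
--     #   ID = start value (assign)
--     ID = 1
--     for row in range(1, y):
--         ID += row
--
--     # x = step
--     # From start row, initial step:
--     #   delta = y + 1 (assign)
--     # Repeat for (step - 1):
--     #   ID += delta
--     #   delta++
--     # Return: str(ID)
--     delta = y + 1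
--     for _ in range(x - 1):
--         ID += delta
--         delta += 1
--
--     return str(ID)
-- ===== SOURCE B (Python) =====
-- def solution(x, y):
--     # closed form: triangular numbers instead of accumulation loops
--     r = max(y - 1, 0)
--     s = max(x - 1, 0)
--     return str(1 + r * (r + 1) // 2 + s * (y + 1) + s * (s - 1) // 2)
-- ===== Notes on version B (the rewrite author's own statement) =====
-- stated objective: faster
-- what changed: Replaced A's two accumulation loops (O(x+y) iterations) by a closed-form triangular-number formula computed in O(1), clamping the loop counts with max(...,0) exactly as the empty ranges do.
import Mathlib
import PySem

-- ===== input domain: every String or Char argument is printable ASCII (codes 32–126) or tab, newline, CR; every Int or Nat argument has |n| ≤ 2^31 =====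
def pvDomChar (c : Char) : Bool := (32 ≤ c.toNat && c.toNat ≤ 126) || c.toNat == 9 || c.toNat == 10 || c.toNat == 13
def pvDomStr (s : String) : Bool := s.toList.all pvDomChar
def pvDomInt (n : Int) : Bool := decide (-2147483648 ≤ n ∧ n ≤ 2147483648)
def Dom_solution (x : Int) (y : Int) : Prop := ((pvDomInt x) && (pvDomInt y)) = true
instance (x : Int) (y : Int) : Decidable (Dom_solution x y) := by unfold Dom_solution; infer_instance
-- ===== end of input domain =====

-- B replaces A's two accumulation loops by a closed-form triangular-number formula (objective: faster).

-- ===== PORT A =====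
def solution (x : Int) (y : Int) : String :=
  if (x, y) = ((1 : Int), (1 : Int)) then PySem.Int.toStr 1
  else
    -- ID = 1; for row in range(1, y): ID += row
    let ID : Int := (PySem.List.pyRange 1 y 1).foldl (fun a row => a + row) 1
    -- delta = y + 1; for _ in range(x - 1): ID += delta; delta += 1
    let p : Int × Int :=
      (PySem.List.pyRange 0 (x - 1) 1).foldl
        (fun (p : Int × Int) _ => (p.1 + p.2, p.2 + 1)) (ID, y + 1)
    PySem.Int.toStr p.1

-- ===== PORT B =====
def solution_alt (x : Int) (y : Int) : String :=
  let r := max (y - 1) 0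
  let s := max (x - 1) 0
  PySem.Int.toStr
    (1 + PySem.Int.floordiv (r * (r + 1)) 2 + s * (y + 1) + PySem.Int.floordiv (s * (s - 1)) 2)

-- ===== PRECONDITION & SPEC =====
def Spec_solution (x : Int) (y : Int) (out : String) : Prop := out = solution_alt x y
instance (x : Int) (y : Int) (out : String) : Decidable (Spec_solution x y out) := by unfold Spec_solution; infer_instance

-- ===== CLAIM (what is proved, stated in full; the proofs are below) =====
def Claim_equal_solution : Prop := ∀ (x : Int) (y : Int), Dom_solution x y → Spec_solution x y (solution x y)

-- ===== LEMMAS AND PROOFS =====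

-- Gauss step for Nat triangular numbers
theorem tri_succ (n : Nat) : (n + 1) * (n + 2) / 2 = n * (n + 1) / 2 + (n + 1) := by
  have h : (n + 1) * (n + 2) = n * (n + 1) + (n + 1) * 2 := by ring
  rw [h, Nat.add_mul_div_right _ _ (by norm_num)]

theorem tri_succ' (n : Nat) : (n + 1) * n / 2 = n * (n - 1) / 2 + n := by
  cases n with
  | zero => simp
  | succ m =>
      simp only [Nat.add_sub_cancel]
      rw [Nat.mul_comm (m + 1 + 1) (m + 1), Nat.mul_comm (m + 1) m]
      exact tri_succ m

-- A's first loop: foldl over range(1, y) adds the triangular number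
theorem firstLoop (n : Nat) (c : Int) :
    (List.range n).foldl (fun (a : Int) (k : Nat) => a + (1 + (k : Int))) c
      = c + ((n * (n + 1) / 2 : Nat) : Int) := by
  induction n generalizing c with
  | zero => simp
  | succ m ih =>
      rw [List.range_succ, List.foldl_append, ih]
      simp only [List.foldl_cons, List.foldl_nil, tri_succ m]
      push_cast
      ring

-- A's second loop (the elements are ignored; only the length matters)
theorem secondLoop {α : Type} (l : List α) (a d : Int) :
    ((l.foldl (fun (p : Int × Int) _ => (p.1 + p.2, p.2 + 1)) (a, d))).1
      = a + (l.length : Int) * d + ((l.length * (l.length - 1) / 2 : Nat) : Int) := by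
  induction l generalizing a d with
  | nil => simp
  | cons hd tl ih =>
      simp only [List.foldl_cons, List.length_cons]
      rw [ih (a + d) (d + 1)]
      simp only [Nat.add_sub_cancel]
      rw [tri_succ' tl.length]
      push_cast
      ring

-- the two Python '// 2' divisions, computed on the matching Nat triangular numbers
theorem fd_tri (n : Nat) :
    PySem.Int.floordiv ((n : Int) * ((n : Int) + 1)) 2 = ((n * (n + 1) / 2 : Nat) : Int) := by
  have h : ((n : Int) * ((n : Int) + 1)) = ((n * (n + 1) : Nat) : Int) := by push_cast; ring
  rw [h]
  exact_mod_cast PySem.Int.floordiv_natCast _ 2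

theorem fd_tri' (n : Nat) :
    PySem.Int.floordiv ((n : Int) * ((n : Int) - 1)) 2 = ((n * (n - 1) / 2 : Nat) : Int) := by
  cases n with
  | zero => simp [PySem.Int.floordiv]
  | succ m =>
      simp only [Nat.add_sub_cancel]
      have h : (((m + 1 : Nat) : Int) * (((m + 1 : Nat) : Int) - 1)) = (((m + 1) * m : Nat) : Int) := by
        push_cast; ring
      rw [h]
      exact_mod_cast PySem.Int.floordiv_natCast _ 2

theorem solution_eq_alt (x y : Int) : solution x y = solution_alt x y := by
  unfold solution solution_alt
  split
  · next h =>
      have hx : x = 1 := (Prod.mk.injEq _ _ _ _ ▸ h).1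
      have hy : y = 1 := (Prod.mk.injEq _ _ _ _ ▸ h).2
      subst hx; subst hy
      decide
  · next h =>
      simp only []
      congr 1
      have hr : max (y - 1) 0 = ((y - 1).toNat : Int) := (Int.ofNat_toNat (y - 1)).symm
      have hs : max (x - 1) 0 = ((x - 1).toNat : Int) := (Int.ofNat_toNat (x - 1)).symm
      rw [hr, hs, fd_tri, fd_tri']
      rw [PySem.List.pyRange_one, List.foldl_map, firstLoop, secondLoop]
      simp only [PySem.List.length_pyRange_one, Int.sub_zero]

-- ===== VERDICT (by name: the statement is the Claim_ definition above) =====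
theorem solution_spec : Claim_equal_solution := by
  intro x y _
  unfold Spec_solution
  exact solution_eq_alt x y
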